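-- pv_equiv track=rewrite | github.com/udaytripurani/Grammar-Minimization | minimize/utils.py | identify_equivalent
-- ===== SOURCE A (Python) =====
-- def identify_equivalent(grammar):
--     non_terminals = list(grammar.keys())
--     n = len(non_terminals)
--     equivalent_pairs = set()
--
--     for i in range(n):
--         for j in range(i + 1, n):
--             Ai, Aj = non_terminals[i], non_terminals[j]
--             if all([(rule in grammar[Aj]) for rule in grammar[Ai]]) and all([(rule in grammar[Ai]) for rule in grammar[Aj]]):
--                 equivalent_pairs.add((Ai, Aj))
--
--     return equivalent_pairs
-- ===== SOURCE B (Python) =====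
-- def identify_equivalent(grammar):
--     # One pass: canonical signature (sorted set of rules) per non-terminal,
--     # then group non-terminals by signature and pair each one with the
--     # later members of its group.
--     sig = {nt: tuple(sorted(set(rules))) for nt, rules in grammar.items()}
--     buckets = {}
--     for nt, s in sig.items():
--         buckets.setdefault(s, []).append(nt)
--     pairs = set()
--     for nt, s in sig.items():
--         members = buckets[s]
--         for other in members[members.index(nt) + 1:]:
--             pairs.add((nt, other))
--     return pairs
-- ===== Notes on version B (the rewrite author's own statement) =====
-- stated objective: faster
-- what changed: Instead of testing every pair of non-terminals for mutual containment of their rule lists, B computes one canonical signature (sorted set of rules) per non-terminal, groups non-terminals by signature in a dict, and emits pairs only within each group.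
import Mathlib
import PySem

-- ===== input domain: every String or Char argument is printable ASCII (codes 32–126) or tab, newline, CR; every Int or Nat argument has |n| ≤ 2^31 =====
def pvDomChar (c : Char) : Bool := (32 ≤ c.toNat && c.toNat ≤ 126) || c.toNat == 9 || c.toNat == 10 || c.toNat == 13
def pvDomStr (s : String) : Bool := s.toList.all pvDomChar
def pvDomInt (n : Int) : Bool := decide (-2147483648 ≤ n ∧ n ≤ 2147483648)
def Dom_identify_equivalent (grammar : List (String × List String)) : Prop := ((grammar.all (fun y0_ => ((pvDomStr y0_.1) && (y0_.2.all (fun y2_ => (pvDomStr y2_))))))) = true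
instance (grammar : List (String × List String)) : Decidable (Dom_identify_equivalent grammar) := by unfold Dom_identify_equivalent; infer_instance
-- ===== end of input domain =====

-- B groups non-terminals by a canonical signature of their rule set instead of
-- A's pairwise mutual-containment test over all pairs (objective: faster).

-- ===== PORT A =====
def identify_equivalent (grammar : List (String × List String)) : List (String × String) :=
  let g := PySem.Dict.ofList grammar
  let non_terminals := g.keys
  let n : Int := PySem.List.len non_terminals
  (PySem.List.pyRange 0 n).foldl (fun acc i =>
    (PySem.List.pyRange (i + 1) n).foldl (fun acc j =>
      let Ai := PySem.List.pyGetD non_terminals i ""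
      let Aj := PySem.List.pyGetD non_terminals j ""
      if ((g.getD Ai []).all (fun rule => (g.getD Aj []).contains rule))
          && ((g.getD Aj []).all (fun rule => (g.getD Ai []).contains rule))
      then PySem.Set.add acc (Ai, Aj) else acc) acc) PySem.Set.empty

-- ===== PORT B =====
-- tuple(sorted(set(rules))): the canonical signature of a rule set
def sigOf (rules : List String) : List String :=
  PySem.List.sorted (PySem.Set.ofList rules) (fun x => x)

def identify_equivalent_alt (grammar : List (String × List String)) : List (String × String) :=
  let g := PySem.Dict.ofList grammar
  let sig : PySem.Dict String (List String) :=
    g.items.foldl (fun d p => d.insert p.1 (sigOf p.2)) PySem.Dict.empty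
  let buckets : PySem.Dict (List String) (List String) :=
    sig.items.foldl (fun d p => d.modify p.2 [] (fun l => l ++ [p.1])) PySem.Dict.empty
  sig.items.foldl (fun pairs p =>
    let members := buckets.getD p.2 []
    -- members.index(p.1): p.1 is always a member of its own bucket, so the
    -- 'none' branch (Python's ValueError) is unreachable; it only makes the code total
    match PySem.List.index? members p.1 with
    | some k => (PySem.List.slice members (some ((k : Int) + 1)) none).foldl
        (fun pr other => PySem.Set.add pr (p.1, other)) pairs
    | none => pairs) PySem.Set.empty

-- ===== PRECONDITION & SPEC =====
def Spec_identify_equivalent (grammar : List (String × List String)) (out : List (String × String)) : Prop := out = identify_equivalent_alt grammar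
instance (grammar : List (String × List String)) (out : List (String × String)) : Decidable (Spec_identify_equivalent grammar out) := by unfold Spec_identify_equivalent; infer_instance

-- ===== CLAIM (what is proved, stated in full; the proofs are below) =====
def Claim_equal_identify_equivalent : Prop := ∀ (grammar : List (String × List String)), Dom_identify_equivalent grammar → Spec_identify_equivalent grammar (identify_equivalent grammar)

-- ===== LEMMAS AND PROOFS =====

-- the common pair sequence both ports build their result set from: for each
-- entry, its key paired with the keys of the later entries with the same
-- signature (second component)
def pairsOf : List (String × List String) → List (String × String)
  | [] => []
  | p :: rest =>
      (rest.filter (fun q => q.2 == p.2)).map (fun q => (p.1, q.1)) ++ pairsOf rest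

-- A's mutual-containment test is exactly equality of canonical signatures
lemma cond_iff_sig (x y : List String) :
    ((x.all (fun r => y.contains r)) && (y.all (fun r => x.contains r))) = (sigOf y == sigOf x) := by
  rw [Bool.eq_iff_iff]
  simp only [Bool.and_eq_true, List.all_eq_true, List.contains_eq_mem, decide_eq_true_eq,
    beq_iff_eq, sigOf, PySem.List.sorted_id_eq_sorted_id_iff_perm]
  rw [List.perm_ext_iff_of_nodup (PySem.Set.nodup_ofList y) (PySem.Set.nodup_ofList x)]
  simp only [PySem.Set.mem_ofList]
  constructor
  · rintro ⟨h1, h2⟩ a; exact ⟨fun h => h2 a h, fun h => h1 a h⟩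
  · intro h; exact ⟨fun a ha => (h a).2 ha, fun a ha => (h a).1 ha⟩

-- index of an element in a list where it occurs exactly once, at the border
lemma idx_mid (a : String) (l1 l2 : List String) (h : a ∉ l1) :
    List.idxOf? a (l1 ++ a :: l2) = some l1.length := by
  rw [List.idxOf?_eq_some_iff]
  refine ⟨by simp, by simp, ?_⟩
  intro j hj
  rw [List.getElem_append_left hj]
  exact fun he => h (he ▸ List.getElem_mem _)

-- B's emission loop over the sig items produces the pairsOf sequence
lemma emit_loop (W : List (String × List String)) (hnd : (W.map (·.1)).Nodup) :
    ∀ (M₂ M₁ : List (String × List String)) (acc : PySem.Set (String × String)), W = M₁ ++ M₂ →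
    M₂.foldl (fun pairs p =>
      let members := (W.filter (fun q => q.2 == p.2)).map (·.1)
      match PySem.List.index? members p.1 with
      | some k => (PySem.List.slice members (some ((k : Int) + 1)) none).foldl
          (fun pr other => PySem.Set.add pr (p.1, other)) pairs
      | none => pairs) acc
    = (pairsOf M₂).foldl PySem.Set.add acc := by
  intro M₂
  induction M₂ with
  | nil => intro M₁ acc h; simp [pairsOf]
  | cons p M₂ ih =>
    intro M₁ acc h
    have hsplit : W.filter (fun q => q.2 == p.2)
        = M₁.filter (fun q => q.2 == p.2) ++ p :: M₂.filter (fun q => q.2 == p.2) := by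
      subst h; simp [List.filter_append]
    have hkeys : W.map (·.1) = M₁.map (·.1) ++ p.1 :: M₂.map (·.1) := by subst h; simp
    have hnotmem : p.1 ∉ M₁.map (·.1) := by
      rw [hkeys] at hnd
      have := (List.nodup_append.mp hnd).2.2
      intro hm; have h2 := this p.1 hm; exact h2 p.1 List.mem_cons_self rfl
    have hnot1 : p.1 ∉ (M₁.filter (fun q => q.2 == p.2)).map (·.1) := by
      intro hm
      obtain ⟨q, hq, hq1⟩ := List.mem_map.mp hm
      exact hnotmem (List.mem_map.mpr ⟨q, List.mem_of_mem_filter hq, hq1⟩)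
    have hidx : PySem.List.index? ((W.filter (fun q => q.2 == p.2)).map (·.1)) p.1
        = some ((M₁.filter (fun q => q.2 == p.2)).map (·.1)).length := by
      rw [hsplit]
      simp only [List.map_append, List.map_cons, PySem.List.index?]
      exact idx_mid _ _ _ hnot1
    simp only [List.foldl_cons, pairsOf, List.foldl_append]
    have hslice : PySem.List.slice ((W.filter (fun q => q.2 == p.2)).map (·.1))
          (some (((((M₁.filter (fun q => q.2 == p.2)).map (·.1)).length : Nat) : Int) + 1)) none
        = (M₂.filter (fun q => q.2 == p.2)).map (·.1) := by
      have : ((((M₁.filter (fun q => q.2 == p.2)).map (·.1)).length : Nat) : Int) + 1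
          = ((((M₁.filter (fun q => q.2 == p.2)).map (·.1)).length + 1 : Nat) : Int) := by push_cast; ring
      rw [this, PySem.List.slice_from_natCast, hsplit]
      simp only [List.map_append, List.map_cons]
      rw [show (M₁.filter (fun q => q.2 == p.2)).map (·.1) ++ p.1 :: (M₂.filter (fun q => q.2 == p.2)).map (·.1)
            = ((M₁.filter (fun q => q.2 == p.2)).map (·.1) ++ [p.1]) ++ (M₂.filter (fun q => q.2 == p.2)).map (·.1) by simp]
      rw [show ((M₁.filter (fun q => q.2 == p.2)).map (·.1)).length + 1 = (((M₁.filter (fun q => q.2 == p.2)).map (·.1)) ++ [p.1]).length by simp]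
      exact List.drop_left
    have hinner : ∀ (acc' : PySem.Set (String × String)),
        ((M₂.filter (fun q => q.2 == p.2)).map (·.1)).foldl (fun pr other => PySem.Set.add pr (p.1, other)) acc'
        = ((M₂.filter (fun q => q.2 == p.2)).map (fun q => (p.1, q.1))).foldl PySem.Set.add acc' := by
      intro acc'; rw [List.foldl_map, List.foldl_map]
    simp only [hidx, hslice]
    rw [hinner, ih (M₁ ++ [p]) _ (by simp [h])]

-- B computes the foldl of Set.add over pairsOf
lemma B_fold (grammar : List (String × List String)) :
    identify_equivalent_alt grammar
      = (pairsOf ((PySem.Dict.ofList grammar).items.map (fun p => (p.1, sigOf p.2)))).foldl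
          PySem.Set.add PySem.Set.empty := by
  unfold identify_equivalent_alt
  set g := PySem.Dict.ofList grammar with hg
  set M := g.items.map (fun p => (p.1, sigOf p.2)) with hM
  have hndk : (g.items.map (·.1)).Nodup := PySem.Dict.nodup_keys_ofList grammar
  clear_value g M
  have hsig : (g.items.foldl (fun d p => d.insert p.1 (sigOf p.2)) PySem.Dict.empty).items = M := by
    rw [PySem.Dict.items_foldl_insert_fresh g.items (fun p => p.1) (fun p => sigOf p.2)
      PySem.Dict.empty (fun a _ => PySem.Dict.contains_empty _) hndk]
    simp [hM, PySem.Dict.empty]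
  have hndM : (M.map (·.1)).Nodup := by
    have : M.map (·.1) = g.items.map (·.1) := by simp [hM]
    rw [this]; exact hndk
  have hbucket : ∀ s, (M.foldl (fun d p => d.modify p.2 [] (fun l => l ++ [p.1])) PySem.Dict.empty).getD s []
      = (M.filter (fun q => q.2 == s)).map (·.1) := by
    intro s
    have hswap : M.foldl (fun d p => d.modify p.2 [] (fun l => l ++ [p.1])) PySem.Dict.empty
        = (M.map (fun p => (p.2, p.1))).foldl (fun d q => d.modify q.1 [] (fun l => l ++ [q.2])) PySem.Dict.empty := by
      rw [List.foldl_map]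
    rw [hswap, PySem.Dict.getD_foldl_modify_append]
    simp [List.filter_map, Function.comp_def]
  simp only [hsig]
  have hfun : (fun (pairs : PySem.Set (String × String)) (p : String × List String) =>
      let members := (M.foldl (fun d p => d.modify p.2 [] (fun l => l ++ [p.1])) PySem.Dict.empty).getD p.2 []
      match PySem.List.index? members p.1 with
      | some k => (PySem.List.slice members (some ((k : Int) + 1)) none).foldl
          (fun pr other => PySem.Set.add pr (p.1, other)) pairs
      | none => pairs)
      = (fun pairs p =>
      let members := (M.filter (fun q => q.2 == p.2)).map (·.1)
      match PySem.List.index? members p.1 with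
      | some k => (PySem.List.slice members (some ((k : Int) + 1)) none).foldl
          (fun pr other => PySem.Set.add pr (p.1, other)) pairs
      | none => pairs) := by
    funext pairs p; simp only [hbucket]
  rw [hfun]
  exact emit_loop M hndM M [] PySem.Set.empty rfl

-- A's double index loop, as structural recursion
def pairsRec {β : Type} : List String → (β → String → String → β) → β → β
  | [], _, init => init
  | x :: rest, G, init => pairsRec rest G (rest.foldl (fun acc y => G acc x y) init)

lemma range_pairs {β : Type} (xs : List String) (G : β → String → String → β) (init : β) :
    (List.range xs.length).foldl
      (fun acc i => (xs.drop (i+1)).foldl (fun acc y => G acc (xs.getD i "") y) acc) init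
    = pairsRec xs G init := by
  induction xs generalizing init with
  | nil => simp [pairsRec]
  | cons x rest ih =>
    rw [List.length_cons, List.range_succ_eq_map, List.foldl_cons, List.foldl_map]
    simp only [List.drop_succ_cons, List.getD_cons_succ, List.getD_cons_zero, List.drop_zero,
      Nat.zero_add]
    rw [pairsRec]
    exact ih _

lemma inner_fold (p1 : String) (sp : List String) (R : List (String × List String))
    (C : String → Bool) (hc : ∀ q ∈ R, C q.1 = (sigOf q.2 == sp)) :
    ∀ init : PySem.Set (String × String),
    R.foldl (fun acc q => if C q.1 then PySem.Set.add acc (p1, q.1) else acc) init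
    = (((R.map (fun p => (p.1, sigOf p.2))).filter (fun q => q.2 == sp)).map
        (fun q => (p1, q.1))).foldl PySem.Set.add init := by
  induction R with
  | nil => intro init; simp
  | cons q R ih =>
    intro init
    rw [List.foldl_cons, List.map_cons, List.filter_cons]
    have hcq := hc q List.mem_cons_self
    by_cases h : sigOf q.2 = sp
    · simp only [hcq, h, beq_self_eq_true, if_pos]
      rw [List.map_cons, List.foldl_cons]
      exact ih (fun r hr => hc r (List.mem_cons_of_mem _ hr)) _
    · have : (sigOf q.2 == sp) = false := by simp [h]
      simp only [hcq, this, if_neg, Bool.false_eq_true, not_false_iff]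
      exact ih (fun r hr => hc r (List.mem_cons_of_mem _ hr)) _

lemma A_rec (g : PySem.Dict String (List String)) (hnd : g.keys.Nodup) :
    ∀ (L : List (String × List String)), (∀ p ∈ L, p ∈ g.items) →
    ∀ init : PySem.Set (String × String),
    pairsRec (L.map (·.1))
      (fun acc a b => if ((g.getD a []).all (fun r => (g.getD b []).contains r))
          && ((g.getD b []).all (fun r => (g.getD a []).contains r))
        then PySem.Set.add acc (a, b) else acc) init
    = (pairsOf (L.map (fun p => (p.1, sigOf p.2)))).foldl PySem.Set.add init := by
  intro L
  induction L with
  | nil => intro _ init; simp [pairsRec, pairsOf]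
  | cons p R ih =>
    intro hsub init
    rw [List.map_cons, pairsRec, List.map_cons]
    rw [show pairsOf ((p.1, sigOf p.2) :: R.map (fun p => (p.1, sigOf p.2)))
        = ((R.map (fun p => (p.1, sigOf p.2))).filter (fun q => q.2 == sigOf p.2)).map
            (fun q => ((p.1, sigOf p.2).1, q.1)) ++ pairsOf (R.map (fun p => (p.1, sigOf p.2))) from rfl]
    rw [List.foldl_append]
    have hp : g.getD p.1 [] = p.2 :=
      PySem.Dict.getD_of_mem_items g (hsub p List.mem_cons_self) hnd []
    have hinner : (R.map (·.1)).foldl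
        (fun acc b => if ((g.getD p.1 []).all (fun r => (g.getD b []).contains r))
            && ((g.getD b []).all (fun r => (g.getD p.1 []).contains r))
          then PySem.Set.add acc (p.1, b) else acc) init
        = (((R.map (fun p => (p.1, sigOf p.2))).filter (fun q => q.2 == sigOf p.2)).map
            (fun q => (p.1, q.1))).foldl PySem.Set.add init := by
      rw [List.foldl_map]
      exact inner_fold p.1 (sigOf p.2) R
        (fun b => ((g.getD p.1 []).all (fun r => (g.getD b []).contains r))
          && ((g.getD b []).all (fun r => (g.getD p.1 []).contains r)))
        (fun q hq => by
          simp only []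
          rw [PySem.Dict.getD_of_mem_items g (hsub q (List.mem_cons_of_mem _ hq)) hnd [], hp]
          exact cond_iff_sig p.2 q.2) init
    rw [hinner]
    exact ih (fun r hr => hsub r (List.mem_cons_of_mem _ hr)) _

-- A computes the foldl of Set.add over the same pairsOf sequence
lemma A_fold (grammar : List (String × List String)) :
    identify_equivalent grammar
      = (pairsOf ((PySem.Dict.ofList grammar).items.map (fun p => (p.1, sigOf p.2)))).foldl
          PySem.Set.add PySem.Set.empty := by
  unfold identify_equivalent
  set g := PySem.Dict.ofList grammar with hg
  set nts := g.keys with hnts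
  have hstep1 : (PySem.List.pyRange 0 (PySem.List.len nts)).foldl (fun acc i =>
      (PySem.List.pyRange (i + 1) (PySem.List.len nts)).foldl (fun acc j =>
        let Ai := PySem.List.pyGetD nts i ""
        let Aj := PySem.List.pyGetD nts j ""
        if ((g.getD Ai []).all (fun rule => (g.getD Aj []).contains rule))
            && ((g.getD Aj []).all (fun rule => (g.getD Ai []).contains rule))
        then PySem.Set.add acc (Ai, Aj) else acc) acc) PySem.Set.empty
    = (PySem.List.pyRange 0 (PySem.List.len nts)).foldl (fun acc i =>
      (nts.drop (i + 1).toNat).foldl (fun acc y =>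
        if ((g.getD (PySem.List.pyGetD nts i "") []).all (fun rule => (g.getD y []).contains rule))
            && ((g.getD y []).all (fun rule => (g.getD (PySem.List.pyGetD nts i "") []).contains rule))
        then PySem.Set.add acc (PySem.List.pyGetD nts i "", y) else acc) acc) PySem.Set.empty := by
    apply PySem.List.foldl_congr_mem
    intro acc i hi
    have h0 : (0:Int) ≤ i + 1 := by
      have := (PySem.List.mem_pyRange_one.mp hi).1; omega
    exact PySem.List.foldl_pyRange_pyGetD nts ""
      (fun acc y =>
        if ((g.getD (PySem.List.pyGetD nts i "") []).all (fun rule => (g.getD y []).contains rule))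
            && ((g.getD y []).all (fun rule => (g.getD (PySem.List.pyGetD nts i "") []).contains rule))
        then PySem.Set.add acc (PySem.List.pyGetD nts i "", y) else acc) acc h0
  rw [hstep1]
  have hlen : PySem.List.len nts = (nts.length : Int) := by simp [PySem.List.len_eq]
  rw [hlen, PySem.List.pyRange_zero_nat nts.length, List.foldl_map]
  have hcast : ∀ i : Nat, (((i:Int)) + 1).toNat = i + 1 := fun i => by omega
  have hbody : (fun (acc : PySem.Set (String × String)) (i : Nat) =>
      (nts.drop ((i:Int) + 1).toNat).foldl (fun acc y =>
        if ((g.getD (PySem.List.pyGetD nts (i:Int) "") []).all (fun rule => (g.getD y []).contains rule))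
            && ((g.getD y []).all (fun rule => (g.getD (PySem.List.pyGetD nts (i:Int) "") []).contains rule))
        then PySem.Set.add acc (PySem.List.pyGetD nts (i:Int) "", y) else acc) acc)
      = (fun acc i =>
      (nts.drop (i + 1)).foldl (fun acc y =>
        if ((g.getD (nts.getD i "") []).all (fun rule => (g.getD y []).contains rule))
            && ((g.getD y []).all (fun rule => (g.getD (nts.getD i "") []).contains rule))
        then PySem.Set.add acc (nts.getD i "", y) else acc) acc) := by
    funext acc i
    rw [hcast i, PySem.List.pyGetD_natCast]
  rw [hbody]
  rw [range_pairs nts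
    (fun acc a b => if ((g.getD a []).all (fun r => (g.getD b []).contains r))
        && ((g.getD b []).all (fun r => (g.getD a []).contains r))
      then PySem.Set.add acc (a, b) else acc) PySem.Set.empty]
  have hkeys : nts = g.items.map (·.1) := rfl
  rw [hkeys]
  exact A_rec g (PySem.Dict.nodup_keys_ofList grammar) g.items (fun _ h => h) PySem.Set.empty

-- ===== VERDICT (by name: the statement is the Claim_ definition above) =====
theorem identify_equivalent_spec : Claim_equal_identify_equivalent := by
  intro grammar _
  unfold Spec_identify_equivalent
  rw [A_fold, B_fold]
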